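-- pv_equiv track=rewrite | github.com/alisemagatroid/code_slice_v2 | slicer.py | create_forward_slice
-- ===== SOURCE A (Python) =====
-- def create_forward_slice(adjacency_list, line_no):
--     sliced_lines = set()
--     sliced_lines.add(line_no)
--     stack = list()
--     stack.append(line_no)
--
--     while len(stack) != 0:
--         cur = stack.pop()
--         if cur not in sliced_lines:
--             sliced_lines.add(cur)
--         adjacents = adjacency_list[cur]
--         for node in adjacents:
--             if node not in sliced_lines:
--                 stack.append(node)
--     return sliced_lines
-- ===== SOURCE B (Python) =====
-- def create_forward_slice(adjacency_list, line_no):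
--     # Recursive DFS: visit marks a node and recurses into its not-yet-seen
--     # neighbors (in reverse order, preserving A's LIFO visitation order).
--     sliced_lines = set()
--
--     def visit(node):
--         sliced_lines.add(node)
--         for neighbor in reversed(adjacency_list[node]):
--             if neighbor not in sliced_lines:
--                 visit(neighbor)
--
--     visit(line_no)
--     return sliced_lines
-- ===== Notes on version B (the rewrite author's own statement) =====
-- stated objective: simpler
-- what changed: Replaced the explicit-stack worklist loop (which can push duplicates and re-pops already-visited nodes) by a recursive DFS helper that marks a node and recurses into unseen neighbors, visiting neighbor lists in reverse to preserve A's LIFO order.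
import Mathlib
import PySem

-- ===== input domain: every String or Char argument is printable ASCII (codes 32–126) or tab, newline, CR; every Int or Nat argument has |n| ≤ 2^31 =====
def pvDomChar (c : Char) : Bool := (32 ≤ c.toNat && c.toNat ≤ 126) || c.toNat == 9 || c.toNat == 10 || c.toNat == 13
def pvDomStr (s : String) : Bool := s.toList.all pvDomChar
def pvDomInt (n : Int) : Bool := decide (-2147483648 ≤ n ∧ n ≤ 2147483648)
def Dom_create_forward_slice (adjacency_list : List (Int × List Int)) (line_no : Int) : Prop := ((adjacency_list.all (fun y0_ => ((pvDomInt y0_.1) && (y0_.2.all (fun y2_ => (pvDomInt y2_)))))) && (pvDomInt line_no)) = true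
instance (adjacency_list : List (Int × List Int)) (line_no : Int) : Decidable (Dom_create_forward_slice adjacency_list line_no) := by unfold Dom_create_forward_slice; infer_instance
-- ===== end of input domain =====

-- B replaces A's explicit-stack worklist loop by a recursive DFS helper (neighbors
-- taken in reverse, preserving A's LIFO visitation order); objective: simpler.

-- ===== PORT A =====
-- adjacency_list[v] (dict lookup); '.getD []' is only a totality guard: under
-- Pre_ the lookup always succeeds (a missing key would be Python's KeyError).
def pyAdj (adjacency_list : List (Int × List Int)) (v : Int) : List Int :=
  (PySem.Dict.get? (PySem.Dict.mk adjacency_list) v).getD []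

-- all ints mentioned in the dict (keys and adjacency values); used for A's fuel
-- bound and B's termination measure
def univAdj (adjacency_list : List (Int × List Int)) : List Int :=
  adjacency_list.flatMap (fun p => p.1 :: p.2)

-- the while loop of A; stack top at the HEAD (Python appends/pops at the end — same
-- LIFO discipline).  The fuel only makes the loop total; it is proved sufficient.
def loopA (adjacency_list : List (Int × List Int)) : Nat → List Int → List Int → List Int
  | 0, sliced_lines, _ => sliced_lines            -- fuel guard, never reached under Pre_
  | _ + 1, sliced_lines, [] => sliced_lines        -- len(stack) == 0
  | fuel + 1, sliced_lines, cur :: stack =>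
      -- 'if cur not in sliced_lines: sliced_lines.add(cur)' = Set.add
      let sliced1 := PySem.Set.add sliced_lines cur
      let adjacents := pyAdj adjacency_list cur
      -- the for loop pushes (in order, LIFO ⇒ reversed onto the head) every
      -- neighbor not in sliced_lines (unchanged during the for loop)
      loopA adjacency_list fuel sliced1
        ((adjacents.filter (fun n => decide (n ∉ sliced1))).reverse ++ stack)

-- fuel: 1 (first pop) + |adj(line_no)| + Σ_v (1 + |adj(v)|) + 1 is enough (proved below)
def fuelA (adjacency_list : List (Int × List Int)) (line_no : Int) : Nat :=
  2 + (pyAdj adjacency_list line_no).length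
    + ((univAdj adjacency_list).map (fun v => 1 + (pyAdj adjacency_list v).length)).sum

def create_forward_slice (adjacency_list : List (Int × List Int)) (line_no : Int) : List Int :=
  loopA adjacency_list (fuelA adjacency_list line_no)
    (PySem.Set.add PySem.Set.empty line_no) [line_no]

-- ===== PORT B =====
-- nodes of the universe still unvisited: B's termination measure
def unvisitedB (adjacency_list : List (Int × List Int)) (S : List Int) : Nat :=
  ((univAdj adjacency_list).filter (fun x => decide (x ∉ S))).length

theorem mem_univAdj_of_mem_pyAdj {adjacency_list : List (Int × List Int)} {v w : Int}
    (h : w ∈ pyAdj adjacency_list v) : w ∈ univAdj adjacency_list := by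
  induction adjacency_list with
  | nil => simp [pyAdj, PySem.Dict.get?] at h
  | cons p rest ih =>
      rw [pyAdj, PySem.Dict.get?_mk_cons] at h
      by_cases hk : p.1 == v
      · rw [if_pos hk] at h
        simp only [Option.getD_some] at h
        simp [univAdj]
        exact Or.inr (Or.inl h)
      · rw [if_neg hk] at h
        have := ih (by simpa [pyAdj] using h)
        simp [univAdj] at this ⊢
        exact Or.inr (Or.inr this)

theorem filter_not_mem_length_le {S T : List Int} (hST : ∀ x ∈ S, x ∈ T) (l : List Int) :
    (l.filter (fun x => decide (x ∉ T))).length ≤ (l.filter (fun x => decide (x ∉ S))).length := by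
  rw [← List.countP_eq_length_filter, ← List.countP_eq_length_filter]
  refine List.countP_mono_left ?_
  intro a _ hp
  simp only [decide_eq_true_eq] at hp ⊢
  exact fun hx => hp (hST a hx)

theorem filter_not_mem_length_lt {S : List Int} {w : Int} (l : List Int)
    (hw : w ∈ l) (hwS : w ∉ S) :
    (l.filter (fun x => decide (x ∉ (S ++ [w])))).length
      < (l.filter (fun x => decide (x ∉ S))).length := by
  obtain ⟨l1, l2, rfl⟩ := List.append_of_mem hw
  rw [← List.countP_eq_length_filter, ← List.countP_eq_length_filter,
    List.countP_append, List.countP_append, List.countP_cons, List.countP_cons]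
  have hsub : ∀ x ∈ S, x ∈ S ++ [w] := fun x hx => by simp [hx]
  have h1 : l1.countP (fun x => decide (x ∉ (S ++ [w]))) ≤ l1.countP (fun x => decide (x ∉ S)) := by
    refine List.countP_mono_left ?_
    intro a _ hp
    simp only [decide_eq_true_eq] at hp ⊢
    exact fun hx => hp (hsub a hx)
  have h2 : l2.countP (fun x => decide (x ∉ (S ++ [w]))) ≤ l2.countP (fun x => decide (x ∉ S)) := by
    refine List.countP_mono_left ?_
    intro a _ hp
    simp only [decide_eq_true_eq] at hp ⊢
    exact fun hx => hp (hsub a hx)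
  have e1 : (decide (w ∉ (S ++ [w])) : Bool) = false := by simp
  have e2 : (decide (w ∉ S) : Bool) = true := by simp [hwS]
  rw [e1, e2]
  simp only [Bool.false_eq_true, if_false, if_true]
  omega

theorem unvisitedB_add_lt {adjacency_list : List (Int × List Int)} {S : List Int} {w : Int}
    (hwu : w ∈ univAdj adjacency_list) (hwS : w ∉ S) :
    unvisitedB adjacency_list (PySem.Set.add S w) < unvisitedB adjacency_list S := by
  rw [PySem.Set.add_of_not_mem hwS]
  exact filter_not_mem_length_lt _ hwu hwS

theorem unvisitedB_le_of_subset {adjacency_list : List (Int × List Int)} {S T : List Int}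
    (h : ∀ x ∈ S, x ∈ T) :
    unvisitedB adjacency_list T ≤ unvisitedB adjacency_list S :=
  filter_not_mem_length_le h _

-- B's recursive DFS.  Python's helper 'visit' adds the node itself on entry; here the
-- add happens at the call site (visitB receives the set with the node already added),
-- which performs the same operations in the same order.  The bundled property
-- (the set only grows) is what makes the recursion well-founded.
mutual
def visitB (adjacency_list : List (Int × List Int)) (S : List Int) (v : Int) :
    {S' : List Int // ∀ x ∈ S, x ∈ S'} :=
  goB adjacency_list S ((pyAdj adjacency_list v).reverse)
    (fun x hx => mem_univAdj_of_mem_pyAdj (List.mem_reverse.mp hx))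
termination_by (unvisitedB adjacency_list S, (pyAdj adjacency_list v).length + 1)
decreasing_by exact Prod.Lex.right _ (by simp)

def goB (adjacency_list : List (Int × List Int)) (S : List Int) :
    (ws : List Int) → (∀ x ∈ ws, x ∈ univAdj adjacency_list) →
    {S' : List Int // ∀ x ∈ S, x ∈ S'}
  | [], _ => ⟨S, fun _ hx => hx⟩
  | w :: ws, h =>
      if hw : w ∈ S then
        goB adjacency_list S ws (fun x hx => h x (List.mem_cons_of_mem _ hx))
      else
        let r := visitB adjacency_list (PySem.Set.add S w) w
        let r2 := goB adjacency_list r.val ws (fun x hx => h x (List.mem_cons_of_mem _ hx))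
        ⟨r2.val, fun x hx => r2.property x (r.property x (by simp [PySem.Set.mem_add, hx]))⟩
termination_by ws _ => (unvisitedB adjacency_list S, ws.length)
decreasing_by
  · exact Prod.Lex.right _ (by simp)
  · exact Prod.Lex.left _ _ (unvisitedB_add_lt (h w (List.mem_cons_self ..)) hw)
  · have h1 : unvisitedB adjacency_list r.val ≤ unvisitedB adjacency_list (PySem.Set.add S w) :=
      unvisitedB_le_of_subset r.property
    have h2 := unvisitedB_add_lt (adjacency_list := adjacency_list)
      (h w (List.mem_cons_self ..)) hw
    exact Prod.Lex.left _ _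
      (show unvisitedB adjacency_list r.val < unvisitedB adjacency_list S by omega)
end

def create_forward_slice_alt (adjacency_list : List (Int × List Int)) (line_no : Int) : List Int :=
  (visitB adjacency_list (PySem.Set.add PySem.Set.empty line_no) line_no).val

-- ===== PRECONDITION & SPEC =====
-- nodes reachable from line_no in the dict-graph: the standard reflexive-transitive
-- closure, computed by saturating level sets (enough rounds to reach every node);
-- this is a property of the input graph, not either port's traversal
def reachClosure (adjacency_list : List (Int × List Int)) (line_no : Int) : List Int :=
  (fun s => PySem.Set.update s (s.flatMap (pyAdj adjacency_list)))^[(univAdj adjacency_list).length + 1] [line_no]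

-- Pre_: every node reachable from line_no (line_no itself included) is a key of the
-- dict — exactly the inputs on which Python's adjacency_list[cur] never raises
-- KeyError (A and B raise on the same inputs: both traverse exactly the reachable nodes).
def Pre_create_forward_slice (adjacency_list : List (Int × List Int)) (line_no : Int) : Prop :=
  ∀ v ∈ reachClosure adjacency_list line_no, v ∈ adjacency_list.map Prod.fst

instance (adjacency_list : List (Int × List Int)) (line_no : Int) :
    Decidable (Pre_create_forward_slice adjacency_list line_no) := by
  unfold Pre_create_forward_slice; infer_instance

def pvWitness_create_forward_slice : (List (Int × List Int)) × Int :=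
  ([(1, [2, 3]), (2, [1]), (3, [])], 1)

def Spec_create_forward_slice (adjacency_list : List (Int × List Int)) (line_no : Int) (out : List Int) : Prop := out = create_forward_slice_alt adjacency_list line_no
instance (adjacency_list : List (Int × List Int)) (line_no : Int) (out : List Int) : Decidable (Spec_create_forward_slice adjacency_list line_no out) := by unfold Spec_create_forward_slice; infer_instance

-- ===== CLAIM (what is proved, stated in full; the proofs are below) =====
def Claim_equal_create_forward_slice : Prop := ∀ (adjacency_list : List (Int × List Int)) (line_no : Int), Dom_create_forward_slice adjacency_list line_no → Pre_create_forward_slice adjacency_list line_no → Spec_create_forward_slice adjacency_list line_no (create_forward_slice adjacency_list line_no)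

-- ===== LEMMAS AND PROOFS =====

theorem goB_cons_mem {adjacency_list : List (Int × List Int)} {S : List Int} {w : Int}
    {ws : List Int} {h h'} (hw : w ∈ S) :
    (goB adjacency_list S (w :: ws) h).val = (goB adjacency_list S ws h').val := by
  rw [goB]; simp [hw]

theorem goB_cons_not_mem {adjacency_list : List (Int × List Int)} {S : List Int} {w : Int}
    {ws : List Int} {h h'} (hw : w ∉ S) :
    (goB adjacency_list S (w :: ws) h).val
      = (goB adjacency_list (visitB adjacency_list (PySem.Set.add S w) w).val ws h').val := by
  rw [goB]; simp [hw]

theorem goB_nil {adjacency_list : List (Int × List Int)} {S : List Int} {h} :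
    (goB adjacency_list S [] h).val = S := by rw [goB]

theorem sum_le_of_sublist {l m : List Nat} (h : List.Sublist m l) : m.sum ≤ l.sum := by
  induction h with
  | slnil => simp
  | cons a h ih => simp; omega
  | cons₂ a h ih => simp; omega

theorem goB_list_congr {adjacency_list : List (Int × List Int)} {S : List Int}
    {ws ws' : List Int} {h h'} (e : ws = ws') :
    (goB adjacency_list S ws h).val = (goB adjacency_list S ws' h').val := by
  subst e; rfl

theorem goB_append {adjacency_list : List (Int × List Int)} (l1 : List Int) {l2 : List Int}
    {S : List Int} {h h1 h2} :
    (goB adjacency_list S (l1 ++ l2) h).val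
      = (goB adjacency_list (goB adjacency_list S l1 h1).val l2 h2).val := by
  induction l1 generalizing S with
  | nil =>
      rw [show (goB adjacency_list S [] h1).val = S from goB_nil]
      rfl
  | cons w l1 ih =>
      by_cases hw : w ∈ S
      · have eL : (goB adjacency_list S (w :: (l1 ++ l2)) h).val
            = (goB adjacency_list S (l1 ++ l2)
                (fun x hx => h x (List.mem_cons_of_mem _ hx))).val := goB_cons_mem hw
        have eR : (goB adjacency_list S (w :: l1) h1).val
            = (goB adjacency_list S l1
                (fun x hx => h1 x (List.mem_cons_of_mem _ hx))).val := goB_cons_mem hw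
        rw [eR]
        exact eL.trans ih
      · have eL : (goB adjacency_list S (w :: (l1 ++ l2)) h).val
            = (goB adjacency_list (visitB adjacency_list (PySem.Set.add S w) w).val (l1 ++ l2)
                (fun x hx => h x (List.mem_cons_of_mem _ hx))).val := goB_cons_not_mem hw
        have eR : (goB adjacency_list S (w :: l1) h1).val
            = (goB adjacency_list (visitB adjacency_list (PySem.Set.add S w) w).val l1
                (fun x hx => h1 x (List.mem_cons_of_mem _ hx))).val := goB_cons_not_mem hw
        rw [eR]
        exact eL.trans ih

-- processing a list with already-marked (w.r.t. a sub-set S0 of the running set)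
-- elements filtered out gives the same set: marked elements are skipped anyway
theorem goB_filter {adjacency_list : List (Int × List Int)} (l : List Int)
    {S S0 : List Int} {h h'} (hsub : ∀ x ∈ S0, x ∈ S) :
    (goB adjacency_list S (l.filter (fun x => decide (x ∉ S0))) h).val
      = (goB adjacency_list S l h').val := by
  induction l generalizing S with
  | nil => rfl
  | cons w l ih =>
      have hmemtail : ∀ x ∈ l.filter (fun x => decide (x ∉ S0)), x ∈ univAdj adjacency_list :=
        fun x hx => h' x (List.mem_cons_of_mem _ (List.mem_filter.mp hx).1)
      by_cases hw0 : w ∈ S0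
      · have e : (w :: l).filter (fun x => decide (x ∉ S0))
            = l.filter (fun x => decide (x ∉ S0)) := by
          simp [hw0]
        refine Eq.trans (goB_list_congr (h' := hmemtail) e) ?_
        rw [goB_cons_mem (h' := fun x hx => h' x (List.mem_cons_of_mem _ hx)) (hsub w hw0)]
        exact ih hsub
      · have e : (w :: l).filter (fun x => decide (x ∉ S0))
            = w :: l.filter (fun x => decide (x ∉ S0)) := by
          simp [hw0]
        have hmemcons : ∀ x ∈ w :: l.filter (fun x => decide (x ∉ S0)),
            x ∈ univAdj adjacency_list := by
          intro x hx
          rcases List.mem_cons.mp hx with rfl | hx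
          · exact h' x (List.mem_cons_self ..)
          · exact hmemtail x hx
        refine Eq.trans (goB_list_congr (h' := hmemcons) e) ?_
        by_cases hw : w ∈ S
        · rw [goB_cons_mem (h' := hmemtail) hw,
            goB_cons_mem (h' := fun x hx => h' x (List.mem_cons_of_mem _ hx)) hw]
          exact ih hsub
        · rw [goB_cons_not_mem (h' := hmemtail) hw,
            goB_cons_not_mem (h' := fun x hx => h' x (List.mem_cons_of_mem _ hx)) hw]
          refine ih (fun x hx => ?_)
          exact (visitB adjacency_list (PySem.Set.add S w) w).property x
            (by simp only [PySem.Set.mem_add]; exact Or.inl (hsub x hx))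

-- A's loop invariant: any stack entry already in the set has each of its
-- not-yet-visited neighbors occurring higher (= earlier) in the stack
def InvA (adjacency_list : List (Int × List Int)) (S stack : List Int) : Prop :=
  ∀ (i : Nat) (hi : i < stack.length), stack[i] ∈ S →
    ∀ w ∈ pyAdj adjacency_list (stack[i]),
      w ∈ S ∨ ∃ (j : Nat) (hj : j < stack.length), j < i ∧ stack[j] = w

theorem InvA_head_adj {adjacency_list : List (Int × List Int)} {S rest : List Int} {cur : Int}
    (h : InvA adjacency_list S (cur :: rest)) (hcur : cur ∈ S) :
    ∀ w ∈ pyAdj adjacency_list cur, w ∈ S := by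
  intro w hw
  have h0 := h 0 (by simp) (by simpa using hcur) w (by simpa using hw)
  rcases h0 with hS | ⟨j, hj, hj0, _⟩
  · exact hS
  · omega

theorem InvA_tail {adjacency_list : List (Int × List Int)} {S rest : List Int} {cur : Int}
    (h : InvA adjacency_list S (cur :: rest)) (hcur : cur ∈ S) :
    InvA adjacency_list S rest := by
  intro i hi hv w hw
  have hi' : i + 1 < (cur :: rest).length := by simp; omega
  have h0 := h (i + 1) hi' (by simpa using hv) w (by simpa using hw)
  rcases h0 with hS | ⟨j, hj, hji, hje⟩
  · exact Or.inl hS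
  · cases j with
    | zero =>
        simp at hje
        exact Or.inl (hje ▸ hcur)
    | succ j' =>
        refine Or.inr ⟨j', by simp at hj ⊢; omega, by omega, by simpa using hje⟩

theorem InvA_step {adjacency_list : List (Int × List Int)} {S rest : List Int} {cur : Int}
    (_hcur : cur ∉ S) (h : InvA adjacency_list S (cur :: rest)) :
    InvA adjacency_list (S ++ [cur])
      (((pyAdj adjacency_list cur).filter (fun n => decide (n ∉ (S ++ [cur])))).reverse ++ rest) := by
  intro i hi hv w hw
  set P := ((pyAdj adjacency_list cur).filter (fun n => decide (n ∉ (S ++ [cur])))).reverse with hP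
  by_cases hik : i < P.length
  · exfalso
    have hgm : (P ++ rest)[i] ∈ P := by
      rw [List.getElem_append_left hik]; exact List.getElem_mem _
    have hPsub : ∀ x ∈ P, x ∉ (S ++ [cur]) := by
      intro x hx
      rw [hP] at hx
      simp only [List.mem_reverse, List.mem_filter, decide_eq_true_eq] at hx
      exact hx.2
    exact hPsub _ hgm hv
  · rw [not_lt] at hik
    have hil : i - P.length < rest.length := by
      have := hi; simp only [List.length_append] at this; omega
    have hgr : (P ++ rest)[i] = rest[i - P.length] := by
      rw [List.getElem_append_right hik]
    rw [hgr] at hv hw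
    rcases List.mem_append.mp hv with hvS | hvcur
    · -- the entry was already in S: use the old invariant one position down
      have hi1 : i - P.length + 1 < (cur :: rest).length := by simp; omega
      have h0 := h (i - P.length + 1) hi1 (by simpa using hvS) w (by simpa using hw)
      rcases h0 with hS | ⟨j, hj, hji, hje⟩
      · exact Or.inl (by simp [hS])
      · cases j with
        | zero =>
            simp at hje
            exact Or.inl (by simp [hje])
        | succ j' =>
            have hj' : j' < rest.length := by simp at hj; omega
            refine Or.inr ⟨P.length + j', by simp; omega, by omega, ?_⟩
            rw [List.getElem_append_right (by omega)]
            simpa using hje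
    · -- the entry is cur itself, just added: its unvisited neighbors are exactly P
      simp only [List.mem_singleton] at hvcur
      rw [hvcur] at hw
      by_cases hwS : w ∈ S ++ [cur]
      · exact Or.inl hwS
      · have hwP : w ∈ P := by
          rw [hP]; simp only [List.mem_reverse, List.mem_filter, decide_eq_true_eq]
          exact ⟨hw, hwS⟩
        obtain ⟨j, hj, hje⟩ := List.mem_iff_getElem.mp hwP
        refine Or.inr ⟨j, by simp; omega, by omega, ?_⟩
        rw [List.getElem_append_left hj]
        exact hje

def WA (adjacency_list : List (Int × List Int)) (S : List Int) : Nat :=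
  (((univAdj adjacency_list).filter (fun x => decide (x ∉ S))).map
    (fun v => 1 + (pyAdj adjacency_list v).length)).sum

theorem sum_map_filter_le {q q' : Int → Bool} (f : Int → Nat) (l : List Int)
    (h : ∀ x, q' x = true → q x = true) :
    ((l.filter q').map f).sum ≤ ((l.filter q).map f).sum :=
  sum_le_of_sublist ((List.monotone_filter_right l h).map f)

theorem WA_drop {adjacency_list : List (Int × List Int)} {S : List Int} {cur : Int}
    (hu : cur ∈ univAdj adjacency_list) (hS : cur ∉ S) :
    WA adjacency_list (S ++ [cur]) + 1 + (pyAdj adjacency_list cur).length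
      ≤ WA adjacency_list S := by
  obtain ⟨l1, l2, he⟩ := List.append_of_mem hu
  unfold WA
  rw [he, List.filter_append, List.filter_append, List.filter_cons, List.filter_cons]
  have e1 : (decide (cur ∉ (S ++ [cur])) : Bool) = false := by simp
  have e2 : (decide (cur ∉ S) : Bool) = true := by simp [hS]
  rw [e1, e2]
  simp only [Bool.false_eq_true, if_false, if_true, List.map_append, List.sum_append,
    List.map_cons, List.sum_cons]
  have himp : ∀ x : Int, decide (x ∉ (S ++ [cur])) = true → decide (x ∉ S) = true := by
    intro x hx
    simp only [decide_eq_true_eq, List.mem_append, List.mem_singleton] at hx ⊢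
    exact fun hmem => hx (Or.inl hmem)
  have hl1 := sum_map_filter_le (fun v => 1 + (pyAdj adjacency_list v).length) l1 himp
  have hl2 := sum_map_filter_le (fun v => 1 + (pyAdj adjacency_list v).length) l2 himp
  omega

theorem WA_le_total {adjacency_list : List (Int × List Int)} {S : List Int} :
    WA adjacency_list S
      ≤ ((univAdj adjacency_list).map (fun v => 1 + (pyAdj adjacency_list v).length)).sum :=
  sum_le_of_sublist (List.Sublist.map _ List.filter_sublist)

def boundA (adjacency_list : List (Int × List Int)) (S stack : List Int) : Nat :=
  stack.length + WA adjacency_list S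

theorem loopA_eq_goB (adjacency_list : List (Int × List Int)) :
    ∀ (fuel : Nat) (S stack : List Int) (hmem : ∀ x ∈ stack, x ∈ univAdj adjacency_list),
      InvA adjacency_list S stack → boundA adjacency_list S stack ≤ fuel →
      loopA adjacency_list fuel S stack = (goB adjacency_list S stack hmem).val := by
  intro fuel
  induction fuel with
  | zero =>
      intro S stack hmem _ hb
      have : stack = [] := by
        have := hb; unfold boundA at this
        exact List.length_eq_zero_iff.mp (by omega)
      subst this
      rw [goB_nil]; rfl
  | succ f ih =>
      intro S stack hmem hInv hb
      cases stack with
      | nil => rw [goB_nil]; rfl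
      | cons cur rest =>
          rw [loopA]
          by_cases hcur : cur ∈ S
          · have hS1 : PySem.Set.add S cur = S := PySem.Set.add_of_mem hcur
            have hadj := InvA_head_adj hInv hcur
            have hfilter : (pyAdj adjacency_list cur).filter
                (fun n => decide (n ∉ S)) = [] := by
              refine List.filter_eq_nil_iff.mpr (fun n hn => ?_)
              simp [hadj n hn]
            rw [hS1, hfilter]
            simp only [List.reverse_nil, List.nil_append]
            have hmem' : ∀ x ∈ rest, x ∈ univAdj adjacency_list :=
              fun x hx => hmem x (List.mem_cons_of_mem _ hx)
            have hb' : boundA adjacency_list S rest ≤ f := by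
              unfold boundA at hb ⊢; simp at hb; omega
            rw [ih S rest hmem' (InvA_tail hInv hcur) hb']
            rw [goB_cons_mem (h' := hmem') hcur]
          · have hS1 : PySem.Set.add S cur = S ++ [cur] := PySem.Set.add_of_not_mem hcur
            rw [hS1]
            set P := ((pyAdj adjacency_list cur).filter
              (fun n => decide (n ∉ (S ++ [cur])))).reverse with hPdef
            have hmemP : ∀ x ∈ P, x ∈ univAdj adjacency_list := by
              intro x hx
              rw [hPdef] at hx
              simp only [List.mem_reverse, List.mem_filter] at hx
              exact mem_univAdj_of_mem_pyAdj hx.1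
            have hmem' : ∀ x ∈ P ++ rest, x ∈ univAdj adjacency_list := by
              intro x hx
              rcases List.mem_append.mp hx with hx | hx
              · exact hmemP x hx
              · exact hmem x (List.mem_cons_of_mem _ hx)
            have hInv' := InvA_step hcur hInv
            have hb' : boundA adjacency_list (S ++ [cur]) (P ++ rest) ≤ f := by
              have hdrop := WA_drop (hmem cur (List.mem_cons_self ..)) hcur
              have hPlen : P.length ≤ (pyAdj adjacency_list cur).length := by
                rw [hPdef, List.length_reverse]
                exact List.length_filter_le _ _
              unfold boundA at hb ⊢
              simp only [List.length_append, List.length_cons] at hb ⊢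
              omega
            rw [ih (S ++ [cur]) (P ++ rest) hmem' hInv' hb']
            -- now convert B's processing of the pushed (filtered) neighbors into
            -- B's recursive visit of cur
            rw [goB_append P (h1 := hmemP)
              (h2 := fun x hx => hmem x (List.mem_cons_of_mem _ hx))]
            rw [goB_cons_not_mem
              (h' := fun x hx => hmem x (List.mem_cons_of_mem _ hx)) hcur]
            have hsets : (goB adjacency_list (S ++ [cur]) P hmemP).val
                = (visitB adjacency_list (PySem.Set.add S cur) cur).val := by
              rw [visitB, hS1]
              refine Eq.trans (goB_list_congr
                (h' := fun x hx => mem_univAdj_of_mem_pyAdj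
                  (List.mem_reverse.mp (List.mem_filter.mp hx).1))
                (by rw [hPdef, List.filter_reverse])) ?_
              exact goB_filter _ (fun x hx => hx)
            rw [hsets]

theorem create_forward_slice_eq (adjacency_list : List (Int × List Int)) (line_no : Int) :
    create_forward_slice adjacency_list line_no
      = create_forward_slice_alt adjacency_list line_no := by
  have hS0 : PySem.Set.add PySem.Set.empty line_no = [line_no] := rfl
  have hmemln : line_no ∈ ([line_no] : List Int) := List.mem_singleton.mpr rfl
  have hfuel : fuelA adjacency_list line_no
      = (1 + (pyAdj adjacency_list line_no).length
          + ((univAdj adjacency_list).map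
              (fun v => 1 + (pyAdj adjacency_list v).length)).sum) + 1 := by
    unfold fuelA; omega
  rw [create_forward_slice, hS0, hfuel, loopA]
  have hS1 : PySem.Set.add [line_no] line_no = [line_no] := PySem.Set.add_of_mem hmemln
  rw [hS1]
  set P := ((pyAdj adjacency_list line_no).filter
    (fun n => decide (n ∉ ([line_no] : List Int)))).reverse with hPdef
  have hmemP : ∀ x ∈ P ++ [], x ∈ univAdj adjacency_list := by
    intro x hx
    rw [List.append_nil] at hx
    rw [hPdef] at hx
    simp only [List.mem_reverse, List.mem_filter] at hx
    exact mem_univAdj_of_mem_pyAdj hx.1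
  have hInv : InvA adjacency_list [line_no] (P ++ []) := by
    intro i hi hv w hw
    exfalso
    have hgm : (P ++ [])[i] ∈ P := by
      have hm := List.getElem_mem hi
      rcases List.mem_append.mp hm with hm | hm
      · exact hm
      · simp at hm
    have hPsub : ∀ x ∈ P, x ∉ ([line_no] : List Int) := by
      intro x hx
      rw [hPdef] at hx
      simp only [List.mem_reverse, List.mem_filter, decide_eq_true_eq] at hx
      exact hx.2
    exact hPsub _ hgm hv
  have hbound : boundA adjacency_list [line_no] (P ++ [])
      ≤ 1 + (pyAdj adjacency_list line_no).length
          + ((univAdj adjacency_list).map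
              (fun v => 1 + (pyAdj adjacency_list v).length)).sum := by
    have h1 : P.length ≤ (pyAdj adjacency_list line_no).length := by
      rw [hPdef, List.length_reverse]
      exact List.length_filter_le _ _
    have h2 := WA_le_total (adjacency_list := adjacency_list) (S := [line_no])
    unfold boundA
    simp only [List.length_append, List.length_nil]
    omega
  rw [loopA_eq_goB adjacency_list _ [line_no] (P ++ []) hmemP hInv hbound]
  have e1 : P ++ [] = ((pyAdj adjacency_list line_no).reverse).filter
      (fun n => decide (n ∉ ([line_no] : List Int))) := by
    rw [List.append_nil, hPdef, List.filter_reverse]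
  refine Eq.trans (goB_list_congr
    (h' := fun x hx => mem_univAdj_of_mem_pyAdj
      (List.mem_reverse.mp (List.mem_filter.mp hx).1)) e1) ?_
  refine Eq.trans (goB_filter (S0 := [line_no])
    (h' := fun x hx => mem_univAdj_of_mem_pyAdj (List.mem_reverse.mp hx))
    _ (fun x hx => hx)) ?_
  rw [create_forward_slice_alt, visitB, hS0]

-- ===== VERDICT (by name: the statement is the Claim_ definition above) =====
theorem create_forward_slice_spec : Claim_equal_create_forward_slice := by
  intro adjacency_list line_no _ _
  unfold Spec_create_forward_slice
  exact create_forward_slice_eq adjacency_list line_no
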